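-- pv_equiv track=rewrite | github.com/jeremygenereux/CORE | BACKEND/database/repositories/player_state_repo.py | is_significantly_decreasing
-- ===== SOURCE A (Python) =====
-- def is_significantly_decreasing(hr_data_list: list[int]) -> bool:
--     if len(hr_data_list) < 2:
--         return False
--     # If the heart rate does not decrease between the first element of the list (most recent)
--     # and the last element of the list (oldest), return False
--     if hr_data_list[0] - hr_data_list[-1] < 0:
--         # if there is any increase between consecutive heart rates, return False
--         for i in range(1, len(hr_data_list)):
--             if hr_data_list[i - 1] - hr_data_list[i] > 0:
--                 return False
--         return True
--     else:
--         return False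
-- ===== SOURCE B (Python) =====
-- def is_significantly_decreasing(hr_data_list: list[int]) -> bool:
--     return (len(hr_data_list) >= 2
--             and hr_data_list[0] < hr_data_list[-1]
--             and hr_data_list == sorted(hr_data_list))
-- ===== Notes on version B (the rewrite author's own statement) =====
-- stated objective: idiomatic
-- what changed: Replaces the explicit consecutive-difference scan with a sort-then-compare (list == sorted(list)) plus the first<last guard, in one boolean expression.
import Mathlib
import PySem

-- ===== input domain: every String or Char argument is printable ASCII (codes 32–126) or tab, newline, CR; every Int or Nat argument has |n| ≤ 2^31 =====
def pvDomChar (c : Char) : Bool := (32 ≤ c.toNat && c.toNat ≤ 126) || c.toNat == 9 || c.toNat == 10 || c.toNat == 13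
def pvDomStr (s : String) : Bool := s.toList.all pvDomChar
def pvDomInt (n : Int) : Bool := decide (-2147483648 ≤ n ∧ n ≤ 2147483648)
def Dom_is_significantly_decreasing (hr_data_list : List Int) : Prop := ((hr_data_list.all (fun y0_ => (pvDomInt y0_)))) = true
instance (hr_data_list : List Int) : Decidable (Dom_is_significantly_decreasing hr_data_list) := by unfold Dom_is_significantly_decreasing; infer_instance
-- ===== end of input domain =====

-- B replaces A's explicit consecutive-difference scan with `list == sorted(list)` plus the
-- same first<last guard; same cost class in practice, chosen for idiomatic brevity.

-- ===== PORT A =====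
-- A's for-loop over i in range(1, len) comparing hr[i-1] - hr[i] > 0, as the obvious
-- structural recursion over consecutive pairs (early return false).
def pvChkA : List Int → Bool
  | a :: b :: rest => if a - b > 0 then false else pvChkA (b :: rest)
  | _ => true

def is_significantly_decreasing (hr_data_list : List Int) : Bool :=
  if hr_data_list.length < 2 then false
  else if ((PySem.List.pyGet? hr_data_list 0).getD 0)
          - ((PySem.List.pyGet? hr_data_list (-1)).getD 0) < 0 then
    -- getD 0 is unreachable defaulting: both indices are in range since length ≥ 2
    pvChkA hr_data_list
  else false

-- ===== PORT B =====
def is_significantly_decreasing_alt (hr_data_list : List Int) : Bool :=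
  decide (2 ≤ hr_data_list.length)
  && decide (((PySem.List.pyGet? hr_data_list 0).getD 0)
             < ((PySem.List.pyGet? hr_data_list (-1)).getD 0))
  && decide (hr_data_list = PySem.List.sorted hr_data_list (fun x => x) false)

-- ===== PRECONDITION & SPEC =====
def Spec_is_significantly_decreasing (hr_data_list : List Int) (out : Bool) : Prop := out = is_significantly_decreasing_alt hr_data_list
instance (hr_data_list : List Int) (out : Bool) : Decidable (Spec_is_significantly_decreasing hr_data_list out) := by unfold Spec_is_significantly_decreasing; infer_instance

-- ===== CLAIM (what is proved, stated in full; the proofs are below) =====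
def Claim_equal_is_significantly_decreasing : Prop := ∀ (hr_data_list : List Int), Dom_is_significantly_decreasing hr_data_list → Spec_is_significantly_decreasing hr_data_list (is_significantly_decreasing hr_data_list)

-- ===== LEMMAS AND PROOFS =====

-- A's scan accepts exactly the (weakly) non-decreasing lists.
theorem pvChkA_eq_true_iff (l : List Int) : pvChkA l = true ↔ l.Pairwise (· ≤ ·) := by
  induction l with
  | nil => simp [pvChkA]
  | cons a t ih =>
    cases t with
    | nil => simp [pvChkA]
    | cons b r =>
      simp only [pvChkA]
      by_cases h : a - b > 0
      · simp only [if_pos h]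
        constructor
        · intro hf; cases hf
        · intro hp
          have hab : a ≤ b := (List.pairwise_cons.mp hp).1 b (by simp)
          omega
      · rw [if_neg h, ih]
        constructor
        · intro hp
          refine List.pairwise_cons.mpr ⟨?_, hp⟩
          intro x hx
          have hbr := List.pairwise_cons.mp hp
          cases hx with
          | head => omega
          | tail _ hx2 => exact le_trans (by omega : a ≤ b) (hbr.1 x hx2)
        · intro hp; exact (List.pairwise_cons.mp hp).2

theorem pvChkA_eq_sorted (l : List Int) :
    pvChkA l = decide (l = PySem.List.sorted l (fun x => x) false) := by
  by_cases h : l.Pairwise (· ≤ ·)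
  · rw [(pvChkA_eq_true_iff l).mpr h, PySem.List.sorted_eq_self_of_pairwise l _ h]
    simp
  · have h1 : pvChkA l = false := by
      cases hc : pvChkA l
      · rfl
      · exact absurd ((pvChkA_eq_true_iff l).mp hc) h
    rw [h1]
    have h2 : l ≠ PySem.List.sorted l (fun x => x) false := by
      intro he
      exact h (by rw [he]; exact PySem.List.sorted_pairwise l _)
    simp [h2]

-- ===== VERDICT (by name: the statement is the Claim_ definition above) =====
theorem is_significantly_decreasing_spec : Claim_equal_is_significantly_decreasing := by
  intro l _
  unfold Spec_is_significantly_decreasing is_significantly_decreasing is_significantly_decreasing_alt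
  by_cases hlen : l.length < 2
  · simp [hlen]
  · have h2 : 2 ≤ l.length := by omega
    simp only [hlen, if_false]
    by_cases hfl : ((PySem.List.pyGet? l 0).getD 0) - ((PySem.List.pyGet? l (-1)).getD 0) < 0
    · have hlt : ((PySem.List.pyGet? l 0).getD 0) < ((PySem.List.pyGet? l (-1)).getD 0) := by omega
      simp [hfl, h2, hlt, pvChkA_eq_sorted]
    · have hnlt : ¬ ((PySem.List.pyGet? l 0).getD 0) < ((PySem.List.pyGet? l (-1)).getD 0) := by omega
      simp [hfl, hnlt]
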